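-- pv_equiv track=rewrite | github.com/rubbieKelvin/linkbucket | core/lib/cx.py | intToCrypt
-- ===== SOURCE A (Python) =====
-- alpha = 'dZkyLBuopAwKCqrsaHejzbcXgfVWihIJNExDnTYFQStOGUlmRPvM'
--
-- def intToCrypt(value: int) -> str:
--     value = str(value)
--     res = ''
--     alpha_ = alpha
--     for i in value:
--         i = int(i)
--         res += ''.join(alpha_[i:i+2])
--         alpha_ = alpha_[2:] + alpha_[:2]
--     return res
-- ===== SOURCE B (Python) =====
-- alpha = 'dZkyLBuopAwKCqrsaHejzbcXgfVWihIJNExDnTYFQStOGUlmRPvM'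
--
-- def intToCrypt(value: int) -> str:
--     L = len(alpha)
--     parts = []
--     for k, ch in enumerate(str(value)):
--         i = int(ch)
--         off = (2 * k) % L
--         parts.append(alpha[(off + i) % L] + alpha[(off + i + 1) % L])
--     return ''.join(parts)
-- ===== Notes on version B (the rewrite author's own statement) =====
-- stated objective: simpler
-- what changed: Replaced the maintained rotated-alphabet string (rebuilt by slicing twice per digit) with a closed-form rotation offset (2*k) % len(alpha) indexed directly into the original alphabet.
import Mathlib
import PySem

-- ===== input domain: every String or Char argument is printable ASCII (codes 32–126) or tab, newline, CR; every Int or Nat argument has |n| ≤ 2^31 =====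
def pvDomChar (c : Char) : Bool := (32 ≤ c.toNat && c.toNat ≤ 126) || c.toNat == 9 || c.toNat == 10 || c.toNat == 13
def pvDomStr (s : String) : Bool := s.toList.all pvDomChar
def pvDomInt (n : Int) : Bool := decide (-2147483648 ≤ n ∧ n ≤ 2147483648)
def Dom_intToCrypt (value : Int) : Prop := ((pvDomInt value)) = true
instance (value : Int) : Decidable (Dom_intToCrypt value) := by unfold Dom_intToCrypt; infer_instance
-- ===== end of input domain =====

-- B replaces A's maintained rotated-alphabet string with a direct closed-form rotation offset into the original alphabet; simpler, same cost.

-- the module-level constant `alpha` (shared by the two Pythons)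
def pvAlpha : List Char := "dZkyLBuopAwKCqrsaHejzbcXgfVWihIJNExDnTYFQStOGUlmRPvM".toList

-- ===== PORT A =====
-- A's loop: res and the rotated alphabet `alpha_` are the carried state.
def pvLoopA : List Char → List Char → List Char → List Char
  | [], res, _ => res
  | c :: rest, res, al =>
    -- i = int(i); int of a non-digit raises ValueError (excluded by Pre_), so the getD default is unreachable
    let i : Int := (PySem.Int.ofChars? [c]).getD 0
    pvLoopA rest (res ++ PySem.List.slice al (some i) (some (i + 2)))
      (PySem.List.slice al (some 2) none ++ PySem.List.slice al none (some 2))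

def intToCrypt (value : Int) : String :=
  String.ofList (pvLoopA (PySem.Int.toChars value) [] pvAlpha)

-- ===== PORT B =====
-- B's per-digit pair alpha[(off+i)%L] + alpha[(off+i+1)%L]; both indices are always in range,
-- so the pyGetD default '?' is unreachable.
def pvPairB (L : Int) (kc : Int × Char) : List Char :=
  let i : Int := (PySem.Int.ofChars? [kc.2]).getD 0
  let off : Int := PySem.Int.mod (2 * kc.1) L
  [PySem.List.pyGetD pvAlpha (PySem.Int.mod (off + i) L) '?',
   PySem.List.pyGetD pvAlpha (PySem.Int.mod (off + i + 1) L) '?']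

def intToCrypt_alt (value : Int) : String :=
  let L : Int := PySem.List.len pvAlpha
  String.ofList (PySem.Chars.join []
    ((PySem.List.enumerate (PySem.Int.toChars value) 0).map (pvPairB L)))

-- ===== PRECONDITION & SPEC =====
-- Pre_ excludes negative values: there str(value) starts with '-' and int('-') raises ValueError (in A and in B alike).
def Pre_intToCrypt (value : Int) : Prop := 0 ≤ value
instance (value : Int) : Decidable (Pre_intToCrypt value) := by unfold Pre_intToCrypt; infer_instance
def pvWitness_intToCrypt : Int := 7

def Spec_intToCrypt (value : Int) (out : String) : Prop := out = intToCrypt_alt value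
instance (value : Int) (out : String) : Decidable (Spec_intToCrypt value out) := by unfold Spec_intToCrypt; infer_instance

-- ===== CLAIM (what is proved, stated in full; the proofs are below) =====
def Claim_equal_intToCrypt : Prop := ∀ (value : Int), Dom_intToCrypt value → Pre_intToCrypt value → Spec_intToCrypt value (intToCrypt value)

-- ===== LEMMAS AND PROOFS =====

-- every character of str(n) for n ≥ 0 is an ASCII digit
def pvIsDig (c : Char) : Prop := 48 ≤ c.toNat ∧ c.toNat ≤ 57

lemma pvChar_eq {c : Char} {d : Char} (h : c.toNat = d.toNat) : c = d :=
  Char.ext (UInt32.toNat_inj.mp h)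

lemma pvDigitChar_dig (m : ℕ) (h : m < 10) : pvIsDig (Nat.digitChar m) := by
  unfold pvIsDig; interval_cases m <;> decide

lemma pvToDigitsCore_dig : ∀ (f n : ℕ) (acc : List Char), (∀ c ∈ acc, pvIsDig c) →
    ∀ c ∈ Nat.toDigitsCore 10 f n acc, pvIsDig c := by
  intro f
  induction f with
  | zero => intro n acc hacc c hc; exact hacc c hc
  | succ f ih =>
    intro n acc hacc c hc
    simp only [Nat.toDigitsCore] at hc
    have hstep : ∀ x ∈ (n % 10).digitChar :: acc, pvIsDig x := by
      intro x hx
      rcases List.mem_cons.mp hx with rfl | hm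
      · exact pvDigitChar_dig _ (Nat.mod_lt _ (by norm_num))
      · exact hacc x hm
    by_cases hnb : n / 10 = 0
    · rw [if_pos hnb] at hc; exact hstep c hc
    · rw [if_neg hnb] at hc; exact ih _ _ hstep c hc

lemma pvToChars_dig (n : Int) (h : 0 ≤ n) : ∀ c ∈ PySem.Int.toChars n, pvIsDig c := by
  intro c hc
  simp only [PySem.Int.toChars, if_neg (by omega : ¬ n < 0)] at hc
  exact pvToDigitsCore_dig _ _ [] (by simp) c hc

-- for a digit char, int(c) is its value, between 0 and 9
lemma pvIv_bound (c : Char) (h : pvIsDig c) :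
    0 ≤ (PySem.Int.ofChars? [c]).getD 0 ∧ (PySem.Int.ofChars? [c]).getD 0 ≤ 9 := by
  obtain ⟨h1, h2⟩ := h
  have hca : c.toNat = 48 ∨ c.toNat = 49 ∨ c.toNat = 50 ∨ c.toNat = 51 ∨ c.toNat = 52 ∨ c.toNat = 53
      ∨ c.toNat = 54 ∨ c.toNat = 55 ∨ c.toNat = 56 ∨ c.toNat = 57 := by omega
  rcases hca with h|h|h|h|h|h|h|h|h|h
  · rw [pvChar_eq (show c.toNat = ('0').toNat by rw [h]; decide)]; decide
  · rw [pvChar_eq (show c.toNat = ('1').toNat by rw [h]; decide)]; decide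
  · rw [pvChar_eq (show c.toNat = ('2').toNat by rw [h]; decide)]; decide
  · rw [pvChar_eq (show c.toNat = ('3').toNat by rw [h]; decide)]; decide
  · rw [pvChar_eq (show c.toNat = ('4').toNat by rw [h]; decide)]; decide
  · rw [pvChar_eq (show c.toNat = ('5').toNat by rw [h]; decide)]; decide
  · rw [pvChar_eq (show c.toNat = ('6').toNat by rw [h]; decide)]; decide
  · rw [pvChar_eq (show c.toNat = ('7').toNat by rw [h]; decide)]; decide
  · rw [pvChar_eq (show c.toNat = ('8').toNat by rw [h]; decide)]; decide
  · rw [pvChar_eq (show c.toNat = ('9').toNat by rw [h]; decide)]; decide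

lemma pvAlpha_len : pvAlpha.length = 52 := by decide

lemma pvTakeTwo {α : Type} (l : List α) (n : ℕ) (h : n + 1 < l.length) :
    (l.drop n).take 2 = [l[n], l[n + 1]] := by
  rw [List.drop_eq_getElem_cons (by omega), List.drop_eq_getElem_cons h]
  rfl

-- the rotation step of A: alpha_[2:] + alpha_[:2] is a left rotation by 2
lemma pvRotStep (m : ℕ) :
    PySem.List.slice (pvAlpha.rotate m) (some 2) none ++ PySem.List.slice (pvAlpha.rotate m) none (some 2)
      = pvAlpha.rotate (m + 2) := by
  rw [show ((2:Int)) = ((2:ℕ):Int) by norm_num, PySem.List.slice_from_natCast, PySem.List.slice_to_natCast,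
    ← List.rotate_eq_drop_append_take (by simp [pvAlpha_len]), ← List.rotate_rotate]

lemma pvJoinNil (xs : List (List Char)) : PySem.Chars.join [] xs = xs.flatten := by
  induction xs with
  | nil => simp [PySem.Chars.join_nil]
  | cons a t ih =>
    cases t with
    | nil => simp [PySem.Chars.join_singleton]
    | cons b u => simp [PySem.Chars.join_cons_cons] at *; simpa using ih

-- one digit step: A's slice of the rotated alphabet is B's closed-form pair
lemma pvStep (k : ℕ) (c : Char)
    (h0 : 0 ≤ (PySem.Int.ofChars? [c]).getD 0) (h9 : (PySem.Int.ofChars? [c]).getD 0 ≤ 9) :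
    PySem.List.slice (pvAlpha.rotate (2 * k)) (some ((PySem.Int.ofChars? [c]).getD 0))
        (some ((PySem.Int.ofChars? [c]).getD 0 + 2)) = pvPairB 52 ((k : Int), c) := by
  set iv : Int := (PySem.Int.ofChars? [c]).getD 0 with hiv
  set n : ℕ := iv.toNat with hn
  have hivn : iv = (n : Int) := by omega
  have hlen : (pvAlpha.rotate (2 * k)).length = 52 := by rw [List.length_rotate, pvAlpha_len]
  rw [PySem.List.slice_toNat _ h0 (by omega)]
  have h2 : (iv + 2).toNat - iv.toNat = 2 := by omega
  rw [h2, pvTakeTwo _ _ (by omega)]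
  rw [List.getElem_rotate, List.getElem_rotate]
  simp only [pvPairB, PySem.Int.mod_eq_emod_of_pos (by norm_num : (0:Int) < 52)]
  rw [PySem.List.pyGetD_eq_getElem _ _ (by omega) (by rw [pvAlpha_len]; push_cast; omega),
      PySem.List.pyGetD_eq_getElem _ _ (by omega) (by rw [pvAlpha_len]; push_cast; omega)]
  congr 1 <;> [skip; congr 1] <;> · congr 1; rw [pvAlpha_len]; omega

-- main loop invariant: A's loop on the alphabet rotated by 2k equals B's pairs enumerated from k
lemma pvLoop_eq (ds : List Char) : ∀ (k : ℕ) (res : List Char), (∀ c ∈ ds, pvIsDig c) →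
    pvLoopA ds res (pvAlpha.rotate (2 * k)) =
      res ++ PySem.Chars.join [] ((PySem.List.enumerate ds (k : Int)).map (pvPairB 52)) := by
  induction ds with
  | nil => intro k res _; simp [pvLoopA, PySem.List.enumerate_nil]
  | cons c rest ih =>
    intro k res hdig
    have hc := pvIv_bound c (hdig c (by simp))
    rw [show pvLoopA (c :: rest) res (pvAlpha.rotate (2 * k))
        = pvLoopA rest (res ++ PySem.List.slice (pvAlpha.rotate (2 * k))
            (some ((PySem.Int.ofChars? [c]).getD 0)) (some ((PySem.Int.ofChars? [c]).getD 0 + 2)))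
          (PySem.List.slice (pvAlpha.rotate (2 * k)) (some 2) none
            ++ PySem.List.slice (pvAlpha.rotate (2 * k)) none (some 2)) from rfl]
    rw [pvRotStep, show 2 * k + 2 = 2 * (k + 1) from by ring,
      ih (k + 1) _ (fun x hx => hdig x (by simp [hx]))]
    rw [PySem.List.enumerate_cons, List.map_cons, pvJoinNil, pvJoinNil, List.flatten_cons,
      pvStep k c hc.1 hc.2]
    push_cast
    simp [List.append_assoc]

-- ===== VERDICT (by name: the statement is the Claim_ definition above) =====
theorem intToCrypt_spec : Claim_equal_intToCrypt := by
  intro value _ hpre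
  unfold Spec_intToCrypt intToCrypt intToCrypt_alt
  have hlen : PySem.List.len pvAlpha = (52 : Int) := by decide
  rw [hlen]
  have h0 : pvAlpha = pvAlpha.rotate (2 * 0) := by simp
  rw [h0, pvLoop_eq (PySem.Int.toChars value) 0 [] (pvToChars_dig value hpre)]
  norm_num
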